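-- pv_equiv track=rewrite | github.com/forus/hackasm | hackasm.py | _strip_labels
-- ===== SOURCE A (Python) =====
-- def _strip_labels(stripped_lines):
--     labelless_lines = []
--     label_symbol_to_code_address = {}
--     for line in stripped_lines:
--         if line.startswith('(') and line.endswith(')'):
--             label = line.lstrip('(').rstrip(')')
--             if label in _predefined_address_symbols:
--                 raise ValueError('"{}" is predefined symbol. Hence cannot be label name.'.format(label))
--             label_symbol_to_code_address[label] = len(labelless_lines)
--         else:
--             labelless_lines.append(line)
--     return labelless_lines, label_symbol_to_code_address
--
-- _predefined_address_symbols = {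
--     'SP': 0,
--     'LCL': 1,
--     'ARG': 2,
--     'THIS': 3,
--     'THAT': 4,
--     'R1': 1,
--     'R2': 2,
--     'R3': 3,
--     'R4': 4,
--     'R5': 5,
--     'R6': 6,
--     'R7': 7,
--     'R8': 8,
--     'R9': 9,
--     'R10': 10,
--     'R11': 11,
--     'R12': 12,
--     'R13': 13,
--     'R14': 14,
--     'R15': 15,
--     'SCREEN': 16384,
--     'KBD': 24576,
-- }
-- ===== SOURCE B (Python) =====
-- def _strip_labels(stripped_lines):
--     def is_code(line):
--         return not (line.startswith('(') and line.endswith(')'))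
--
--     labelless_lines = [line for line in stripped_lines if is_code(line)]
--     label_symbol_to_code_address = {}
--     for i, line in enumerate(stripped_lines):
--         if not is_code(line):
--             label = line.lstrip('(').rstrip(')')
--             if label in _predefined_address_symbols:
--                 raise ValueError('"{}" is predefined symbol. Hence cannot be label name.'.format(label))
--             label_symbol_to_code_address[label] = sum(1 for l in stripped_lines[:i] if is_code(l))
--     return labelless_lines, label_symbol_to_code_address
--
-- _predefined_address_symbols = {
--     'SP': 0, 'LCL': 1, 'ARG': 2, 'THIS': 3, 'THAT': 4,
--     'R1': 1, 'R2': 2, 'R3': 3, 'R4': 4, 'R5': 5, 'R6': 6, 'R7': 7,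
--     'R8': 8, 'R9': 9, 'R10': 10, 'R11': 11, 'R12': 12, 'R13': 13,
--     'R14': 14, 'R15': 15, 'SCREEN': 16384, 'KBD': 24576,
-- }
-- ===== Notes on version B (the rewrite author's own statement) =====
-- stated objective: alternative
-- what changed: A's single interleaved pass that appends code lines and records each label address as the growing list's length is replaced by a filter comprehension for the labelless lines plus an enumerate loop that computes each label's address independently as the count of code lines in the prefix slice before it.
import Mathlib
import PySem

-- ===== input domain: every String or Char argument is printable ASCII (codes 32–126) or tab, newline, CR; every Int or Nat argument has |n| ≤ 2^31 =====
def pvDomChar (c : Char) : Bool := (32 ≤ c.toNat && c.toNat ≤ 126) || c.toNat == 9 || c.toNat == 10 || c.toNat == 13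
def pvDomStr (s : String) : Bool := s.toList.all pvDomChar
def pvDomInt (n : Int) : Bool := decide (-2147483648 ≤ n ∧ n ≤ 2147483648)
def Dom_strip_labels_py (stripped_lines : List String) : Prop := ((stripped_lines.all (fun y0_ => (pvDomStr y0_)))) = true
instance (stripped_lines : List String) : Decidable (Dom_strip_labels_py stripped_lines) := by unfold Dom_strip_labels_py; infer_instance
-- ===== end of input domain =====

-- B replaces A's single interleaved append-and-record pass by a filter comprehension
-- plus an enumerate loop that recomputes each label's address as the count of code lines
-- in the prefix slice before it (alternative decomposition; B is asymptotically slower).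

-- ===== PORT A =====
-- the keys of _predefined_address_symbols (only membership is used)
def pvPredef : List String :=
  ["SP", "LCL", "ARG", "THIS", "THAT", "R1", "R2", "R3", "R4", "R5", "R6", "R7",
   "R8", "R9", "R10", "R11", "R12", "R13", "R14", "R15", "SCREEN", "KBD"]

-- line.startswith('(') and line.endswith(')')
def pvIsLabel (line : String) : Bool :=
  PySem.Str.startswith line "(" && PySem.Str.endswith line ")"

-- line.lstrip('(').rstrip(')') — exact: the strip sets are single characters,
-- so dropWhile from each end is exactly Python's lstrip/rstrip with chars
def pvStripParens (line : String) : String :=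
  String.ofList (((line.toList.dropWhile (· == '(')).reverse.dropWhile (· == ')')).reverse)

def strip_labels_py (stripped_lines : List String) : List String × (List (String × Int)) :=
  let st := stripped_lines.foldl
    (fun (st : List String × PySem.Dict String Int) line =>
      if pvIsLabel line then
        -- Python raises ValueError here when pvStripParens line ∈ pvPredef; Pre_ excludes those inputs
        (st.1, st.2.insert (pvStripParens line) (st.1.length : Int))
      else
        (st.1 ++ [line], st.2))
    ([], PySem.Dict.empty)
  (st.1, st.2.items)

-- ===== PORT B =====
-- not (line.startswith('(') and line.endswith(')'))
def pvIsCode (line : String) : Bool := !(pvIsLabel line)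

def strip_labels_py_alt (stripped_lines : List String) : List String × (List (String × Int)) :=
  let labelless_lines := stripped_lines.filter (fun line => pvIsCode line)
  let d := (PySem.List.enumerate stripped_lines).foldl
    (fun (d : PySem.Dict String Int) p =>
      if !(pvIsCode p.2) then
        -- Python raises ValueError here when pvStripParens p.2 ∈ pvPredef; Pre_ excludes those inputs
        d.insert (pvStripParens p.2)
          -- sum(1 for l in stripped_lines[:i] if is_code(l))
          ((PySem.List.slice stripped_lines none (some p.1)).foldl
            (fun acc l => if pvIsCode l then acc + 1 else acc) (0 : Int))
      else d)
    PySem.Dict.empty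
  (labelless_lines, d.items)

-- ===== PRECONDITION & SPEC =====
-- Pre_ excludes exactly the inputs on which A raises ValueError: a label line whose
-- stripped name is a predefined symbol. B raises the same ValueError there.
def Pre_strip_labels_py (stripped_lines : List String) : Prop :=
  ∀ line ∈ stripped_lines, pvIsLabel line = true → pvStripParens line ∉ pvPredef

instance (stripped_lines : List String) : Decidable (Pre_strip_labels_py stripped_lines) := by
  unfold Pre_strip_labels_py; infer_instance

def pvWitness_strip_labels_py : List String := ["(LOOP)", "@1", "D=A", "(END)", "@END"]

def Spec_strip_labels_py (stripped_lines : List String) (out : List String × (List (String × Int))) : Prop := out = strip_labels_py_alt stripped_lines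
instance (stripped_lines : List String) (out : List String × (List (String × Int))) : Decidable (Spec_strip_labels_py stripped_lines out) := by unfold Spec_strip_labels_py; infer_instance

-- ===== CLAIM (what is proved, stated in full; the proofs are below) =====
def Claim_equal_strip_labels_py : Prop := ∀ (stripped_lines : List String), Dom_strip_labels_py stripped_lines → Pre_strip_labels_py stripped_lines → Spec_strip_labels_py stripped_lines (strip_labels_py stripped_lines)

-- ===== LEMMAS AND PROOFS =====

-- reference recursion: the dict both loops build (n = number of code lines seen so far)
def pvG : List String → Int → PySem.Dict String Int → PySem.Dict String Int
  | [], _, d => d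
  | l :: ls, n, d =>
    if pvIsLabel l then pvG ls n (d.insert (pvStripParens l) n) else pvG ls (n + 1) d

-- A's interleaved fold: the list part is acc ++ filter, the dict part is pvG
theorem pvA_fold (lines : List String) :
    ∀ (acc : List String) (d : PySem.Dict String Int),
      lines.foldl
        (fun (st : List String × PySem.Dict String Int) line =>
          if pvIsLabel line then
            (st.1, st.2.insert (pvStripParens line) (st.1.length : Int))
          else
            (st.1 ++ [line], st.2)) (acc, d)
      = (acc ++ lines.filter (fun l => pvIsCode l), pvG lines (acc.length : Int) d) := by
  induction lines with
  | nil => intro acc d; simp [pvG]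
  | cons l ls ih =>
    intro acc d
    by_cases h : pvIsLabel l = true
    · simp [List.foldl_cons, h, ih, pvG, pvIsCode]
    · have h' : pvIsLabel l = false := by simpa using h
      simp only [List.foldl_cons, List.filter_cons, pvIsCode, h', Bool.not_false, if_true,
        Bool.false_eq_true, if_false, pvG]
      rw [ih (acc ++ [l]) d]
      simp only [List.length_append, List.length_cons, List.length_nil, List.append_assoc,
        List.singleton_append]
      push_cast
      ring_nf
      simp [pvIsCode]

-- B's enumerate fold equals pvG when started at index s with drop/take bookkeeping
theorem pvB_fold (L : List String) (ls : List String) :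
    ∀ (s : Nat) (d : PySem.Dict String Int), ls = L.drop s →
      (PySem.List.enumerate ls (s : Int)).foldl
        (fun (d : PySem.Dict String Int) p =>
          if !(pvIsCode p.2) then
            d.insert (pvStripParens p.2)
              ((PySem.List.slice L none (some p.1)).foldl
                (fun acc l => if pvIsCode l then acc + 1 else acc) (0 : Int))
          else d) d
      = pvG ls (((L.take s).countP (fun l => pvIsCode l) : Nat) : Int) d := by
  induction ls with
  | nil => intro s d _; simp [pvG]
  | cons l ls ih =>
    intro s d hdrop
    have hs : s < L.length := by
      by_contra hge
      rw [List.drop_eq_nil_of_le (Nat.le_of_not_lt hge)] at hdrop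
      exact List.cons_ne_nil l ls hdrop
    have hget : L[s]? = some l := by
      have h0 := congrArg (fun t => t[0]?) hdrop
      simp only [List.getElem?_cons_zero, List.getElem?_drop] at h0
      simpa using h0.symm
    have htake : L.take (s + 1) = L.take s ++ [l] := by
      rw [List.take_add_one, hget]; rfl
    have htail : ls = L.drop (s + 1) := by
      have h1 : (L.drop s).tail = L.drop (s + 1) := List.tail_drop
      rw [← hdrop] at h1
      simpa using h1
    have hcast : ((s : Nat) : Int) + 1 = (((s + 1 : Nat)) : Int) := by push_cast; ring
    have hval : (PySem.List.slice L none (some ((s : Nat) : Int))).foldl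
        (fun acc l => if pvIsCode l then acc + 1 else acc) (0 : Int)
        = (((L.take s).countP (fun l => pvIsCode l) : Nat) : Int) := by
      rw [PySem.List.slice_to_natCast, PySem.List.foldl_if_add_one]
      simp
    rw [PySem.List.enumerate_cons, List.foldl_cons, hcast]
    by_cases h : pvIsLabel l = true
    · have hc : pvIsCode l = false := by simp [pvIsCode, h]
      simp only [hc, Bool.not_false, if_true]
      rw [hval, ih (s + 1) _ htail]
      have hcnt : (L.take (s + 1)).countP (fun l => pvIsCode l)
          = (L.take s).countP (fun l => pvIsCode l) := by
        rw [htake, List.countP_append]; simp [hc]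
      rw [hcnt]
      simp [pvG, h]
    · have hc : pvIsCode l = true := by simp [pvIsCode, h]
      simp only [hc, Bool.not_true, Bool.false_eq_true, if_false]
      rw [ih (s + 1) _ htail]
      have hcnt : (L.take (s + 1)).countP (fun l => pvIsCode l)
          = (L.take s).countP (fun l => pvIsCode l) + 1 := by
        rw [htake, List.countP_append]; simp [hc]
      rw [hcnt]
      simp only [pvG, h, Bool.false_eq_true, if_false]
      push_cast
      ring_nf

-- ===== VERDICT (by name: the statement is the Claim_ definition above) =====
theorem strip_labels_py_spec : Claim_equal_strip_labels_py := by
  intro stripped_lines _ _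
  unfold Spec_strip_labels_py strip_labels_py strip_labels_py_alt
  have hb := pvB_fold stripped_lines stripped_lines 0 PySem.Dict.empty rfl
  simp only [List.take_zero, List.countP_nil, Nat.cast_zero] at hb
  rw [pvA_fold stripped_lines [] PySem.Dict.empty]
  simp only [List.nil_append, List.length_nil, Nat.cast_zero]
  rw [← hb]
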